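-- pv_equiv track=rewrite | github.com/robbyz512/dota2-minify | helper.py | getAppHeight
-- ===== SOURCE A (Python) =====
-- def getAppHeight(mods_folders):
--     height = 460
--
--     num_of_mods = len(mods_folders)
--     i = 10
--
--     while (i < num_of_mods):
--         i += 1
--         height += 30
--
--     return height
-- ===== SOURCE B (Python) =====
-- def getAppHeight(mods_folders):
--     return 460 + max(0, len(mods_folders) - 10) * 30
-- ===== Notes on version B (the rewrite author's own statement) =====
-- stated objective: faster
-- what changed: Replaced the while-loop that adds 30 per mod beyond the tenth with the closed-form 460 + max(0, n-10)*30.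
import Mathlib
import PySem

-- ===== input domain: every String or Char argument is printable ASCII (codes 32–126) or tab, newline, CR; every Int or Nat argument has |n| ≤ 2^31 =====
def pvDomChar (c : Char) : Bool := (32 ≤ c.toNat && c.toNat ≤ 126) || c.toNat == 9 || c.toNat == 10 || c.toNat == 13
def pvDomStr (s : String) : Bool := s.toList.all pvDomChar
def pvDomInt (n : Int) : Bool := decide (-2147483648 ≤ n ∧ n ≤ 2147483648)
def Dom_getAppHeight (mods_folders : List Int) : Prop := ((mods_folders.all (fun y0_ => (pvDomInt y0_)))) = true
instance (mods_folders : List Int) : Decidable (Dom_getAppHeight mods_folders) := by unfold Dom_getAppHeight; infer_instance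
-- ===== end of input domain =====

-- B replaces A's per-mod while-loop with the closed form 460 + max(0, n-10)*30 (objective: faster).


-- ===== PORT A =====
-- while (i < num_of_mods): i += 1; height += 30
def getAppHeightLoop (i num_of_mods height : Int) : Int :=
  if i < num_of_mods then getAppHeightLoop (i + 1) num_of_mods (height + 30)
  else height
termination_by (num_of_mods - i).toNat
decreasing_by omega

def getAppHeight (mods_folders : List Int) : Int :=
  getAppHeightLoop 10 (mods_folders.length : Int) 460

-- ===== PORT B =====
def getAppHeight_alt (mods_folders : List Int) : Int :=
  460 + max 0 ((mods_folders.length : Int) - 10) * 30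

-- ===== PRECONDITION & SPEC =====
def Spec_getAppHeight (mods_folders : List Int) (out : Int) : Prop := out = getAppHeight_alt mods_folders
instance (mods_folders : List Int) (out : Int) : Decidable (Spec_getAppHeight mods_folders out) := by unfold Spec_getAppHeight; infer_instance

-- ===== CLAIM (what is proved, stated in full; the proofs are below) =====
def Claim_equal_getAppHeight : Prop := ∀ (mods_folders : List Int), Dom_getAppHeight mods_folders → Spec_getAppHeight mods_folders (getAppHeight mods_folders)

-- ===== LEMMAS AND PROOFS =====

-- ===== VERDICT (by name: the statement is the Claim_ definition above) =====
theorem getAppHeightLoop_eq (n : Int) : ∀ (i h : Int), getAppHeightLoop i n h = h + max 0 (n - i) * 30 := by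
  intro i h
  induction hfuel : (n - i).toNat generalizing i h with
  | zero =>
    rw [getAppHeightLoop]
    have : ¬ i < n := by omega
    simp [this]; omega
  | succ k ih =>
    rw [getAppHeightLoop]
    have hi : i < n := by omega
    simp [hi]
    rw [ih (i + 1) (h + 30) (by omega)]
    have : max 0 (n - (i + 1)) = n - i - 1 := by omega
    have h2 : max 0 (n - i) = n - i := by omega
    rw [this, h2]; ring

theorem getAppHeight_spec : Claim_equal_getAppHeight := by
  intro xs _
  unfold Spec_getAppHeight getAppHeight getAppHeight_alt
  rw [getAppHeightLoop_eq]
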